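-- pv_equiv track=rewrite | github.com/marcomaida/claycode | experiments/siggraph_2025_artifact/tree_lib/encodings/entropy.py | number_to_div2_decomposition
-- ===== SOURCE A (Python) =====
-- def number_to_div2_decomposition(n):
--     dec = []
--     n-=1
--     while n > 0:
--         div2 = (n+1) // 2
--         dec += [div2]
--         n-=(div2*2)-1
--     return dec
-- ===== SOURCE B (Python) =====
-- def number_to_div2_decomposition(n):
--     m = n - 1
--     if m <= 0:
--         return []
--     if m % 2 == 1:
--         return [(m + 1) // 2]
--     return [m // 2, 1]
-- ===== Notes on version B (the rewrite author's own statement) =====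
-- stated objective: simpler
-- what changed: Replaces the repeated-subtraction while loop with the closed-form answer it always reaches within two iterations: a direct parity case split on n-1.
import Mathlib
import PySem

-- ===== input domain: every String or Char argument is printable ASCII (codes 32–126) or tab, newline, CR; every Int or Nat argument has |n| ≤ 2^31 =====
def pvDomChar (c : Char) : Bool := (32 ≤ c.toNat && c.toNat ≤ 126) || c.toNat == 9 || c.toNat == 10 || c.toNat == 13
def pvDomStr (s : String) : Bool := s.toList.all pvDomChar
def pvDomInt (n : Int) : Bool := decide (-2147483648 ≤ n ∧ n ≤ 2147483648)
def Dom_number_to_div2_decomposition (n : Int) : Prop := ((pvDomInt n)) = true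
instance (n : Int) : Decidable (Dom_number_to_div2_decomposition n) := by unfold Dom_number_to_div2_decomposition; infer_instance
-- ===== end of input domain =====

-- B replaces A's repeated-subtraction while loop with the closed-form parity case split it always produces; objective: simpler.
-- ===== PORT A =====
-- the while loop of A, carried as structural recursion on the loop state (n, dec)
def pvLoopA (n : Int) (dec : List Int) : List Int :=
  if _h : n > 0 then
    let div2 := PySem.Int.floordiv (n + 1) 2
    pvLoopA (n - (div2 * 2 - 1)) (dec ++ [div2])
  else dec
termination_by n.toNat
decreasing_by
  simp only [PySem.Int.floordiv_eq_ediv_of_pos (by omega : (0:Int) < 2)]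
  omega

def number_to_div2_decomposition (n : Int) : List Int :=
  pvLoopA (n - 1) []

-- ===== PORT B =====
def number_to_div2_decomposition_alt (n : Int) : List Int :=
  let m := n - 1
  if m ≤ 0 then []
  else if PySem.Int.mod m 2 = 1 then [PySem.Int.floordiv (m + 1) 2]
  else [PySem.Int.floordiv m 2, 1]

-- ===== PRECONDITION & SPEC =====
def Spec_number_to_div2_decomposition (n : Int) (out : List Int) : Prop := out = number_to_div2_decomposition_alt n
instance (n : Int) (out : List Int) : Decidable (Spec_number_to_div2_decomposition n out) := by unfold Spec_number_to_div2_decomposition; infer_instance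

-- ===== CLAIM (what is proved, stated in full; the proofs are below) =====
def Claim_equal_number_to_div2_decomposition : Prop := ∀ (n : Int), Dom_number_to_div2_decomposition n → Spec_number_to_div2_decomposition n (number_to_div2_decomposition n)

-- ===== LEMMAS AND PROOFS =====

-- ===== VERDICT (by name: the statement is the Claim_ definition above) =====
-- the loop's result in closed form: one unfolding per parity case
lemma pvLoopA_closed (m : Int) :
    pvLoopA m [] =
      (if m ≤ 0 then []
       else if PySem.Int.mod m 2 = 1 then [PySem.Int.floordiv (m + 1) 2]
       else [PySem.Int.floordiv m 2, 1]) := by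
  by_cases hle : m ≤ 0
  · rw [pvLoopA]
    simp [not_lt.mpr hle, hle]
  · have hpos : 0 < m := by omega
    have h2 : (0:Int) < 2 := by omega
    rw [pvLoopA]
    simp only [PySem.Int.floordiv_eq_ediv_of_pos h2, PySem.Int.mod_eq_emod_of_pos h2, hpos,
      dif_pos]
    rcases Int.emod_two_eq m with he | ho
    · -- m even: loop body runs with n' = 1, then once more to 0
      have hne : ¬ m % 2 = 1 := by omega
      have hd : m - ((m + 1) / 2 * 2 - 1) = 1 := by omega
      have hd2 : (m + 1) / 2 = m / 2 := by omega
      rw [hd, hd2, pvLoopA]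
      norm_num [PySem.Int.floordiv_eq_ediv_of_pos h2]
      rw [pvLoopA]
      simp [hne, if_neg (by omega : ¬ m ≤ 0)]
    · -- m odd: loop body runs once, n' = 0
      have hd : m - ((m + 1) / 2 * 2 - 1) = 0 := by omega
      rw [hd, pvLoopA]
      simp [if_neg (by omega : ¬ m ≤ 0), ho]

theorem number_to_div2_decomposition_spec : Claim_equal_number_to_div2_decomposition := by
  intro n _
  unfold Spec_number_to_div2_decomposition number_to_div2_decomposition
    number_to_div2_decomposition_alt
  exact pvLoopA_closed (n - 1)
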